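-- pv_equiv track=rewrite | github.com/ChristopheZhao/image-gen-mcp-server | src/mcp_image_server/transports/auth.py | _is_whitelisted_path
-- ===== SOURCE A (Python) =====
-- from typing import List, Optional
--
-- def _is_whitelisted_path(path: str, whitelist_paths: List[str]) -> bool:
--     """
--     Check if request path is whitelisted.
--
--     Supports exact match and prefix wildcard pattern:
--     - exact: /health
--     - prefix: /images*
--     """
--     for pattern in whitelist_paths:
--         if pattern.endswith("*"):
--             prefix = pattern[:-1]
--             if path.startswith(prefix):
--                 return True
--         elif path == pattern:
--             return True
--     return False
-- ===== SOURCE B (Python) =====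
-- def _is_whitelisted_path(path, whitelist_paths):
--     # Reverse lookup: a pattern matches `path` iff it is literally `path` itself
--     # or `path[:k] + "*"` for some 0 <= k <= len(path).  So instead of scanning
--     # the whitelist and testing each pattern against the path, enumerate the
--     # len(path)+2 candidate patterns derived from the path and look each one up
--     # in a hash set built from the whitelist.
--     patterns = set(whitelist_paths)
--     if path in patterns:
--         return True
--     return any(path[:k] + "*" in patterns for k in range(len(path) + 1))
-- ===== Notes on version B (the rewrite author's own statement) =====
-- stated objective: alternative
-- what changed: B inverts the search: a pattern matches iff it equals the path or equals path[:k]+'*' for some k, so B builds a hash set of the whitelist once and looks up the len(path)+2 candidate patterns derived from the path, instead of A's loop testing every whitelist pattern against the path.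
import Mathlib
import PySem

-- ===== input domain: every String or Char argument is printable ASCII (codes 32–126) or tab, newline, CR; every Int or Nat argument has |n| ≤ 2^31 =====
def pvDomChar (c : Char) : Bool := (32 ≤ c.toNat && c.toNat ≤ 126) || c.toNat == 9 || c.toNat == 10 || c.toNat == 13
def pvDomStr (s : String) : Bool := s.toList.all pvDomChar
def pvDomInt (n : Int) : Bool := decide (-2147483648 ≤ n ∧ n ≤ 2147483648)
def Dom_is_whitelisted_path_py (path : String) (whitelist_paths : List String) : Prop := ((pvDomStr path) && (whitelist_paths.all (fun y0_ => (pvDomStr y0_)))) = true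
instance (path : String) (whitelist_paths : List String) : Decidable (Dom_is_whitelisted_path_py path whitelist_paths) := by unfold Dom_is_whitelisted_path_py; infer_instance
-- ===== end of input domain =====

-- B inverts the search: instead of scanning the whitelist and testing each pattern against the
-- path, it builds a set of the whitelist once and looks up the len(path)+2 candidate patterns
-- ('path' itself and 'path[:k] + "*"' for each k) that could possibly match (alternative algorithm).

-- ===== PORT A =====
def is_whitelisted_path_py (path : String) (whitelist_paths : List String) : Bool :=
  match whitelist_paths with
  | [] => false
  | pattern :: rest =>
    if PySem.Str.endswith pattern "*" then
      let pre := PySem.Str.slice pattern none (some (-1))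
      if PySem.Str.startswith path pre then true
      else is_whitelisted_path_py path rest
    else if path == pattern then true
    else is_whitelisted_path_py path rest

-- ===== PORT B =====
-- path[:k] + "*" — the candidate pattern; the concatenation is done exactly on code-point lists
def pvCand (path : String) (k : Int) : String :=
  String.ofList (PySem.Chars.slice path.toList none (some k) ++ ['*'])

def is_whitelisted_path_py_alt (path : String) (whitelist_paths : List String) : Bool :=
  let patterns := PySem.Set.ofList whitelist_paths
  if PySem.Set.contains patterns path then true
  else (PySem.List.pyRange 0 (PySem.Str.len path + 1) 1).any
        (fun k => PySem.Set.contains patterns (pvCand path k))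

-- ===== PRECONDITION & SPEC =====
def Spec_is_whitelisted_path_py (path : String) (whitelist_paths : List String) (out : Bool) : Prop := out = is_whitelisted_path_py_alt path whitelist_paths
instance (path : String) (whitelist_paths : List String) (out : Bool) : Decidable (Spec_is_whitelisted_path_py path whitelist_paths out) := by unfold Spec_is_whitelisted_path_py; infer_instance

-- ===== CLAIM (what is proved, stated in full; the proofs are below) =====
def Claim_equal_is_whitelisted_path_py : Prop := ∀ (path : String) (whitelist_paths : List String), Dom_is_whitelisted_path_py path whitelist_paths → Spec_is_whitelisted_path_py path whitelist_paths (is_whitelisted_path_py path whitelist_paths)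

-- ===== LEMMAS AND PROOFS =====

-- what A's per-pattern branch computes
def pvMatch (path pattern : String) : Bool :=
  if PySem.Str.endswith pattern "*" then
    PySem.Str.startswith path (PySem.Str.slice pattern none (some (-1)))
  else path == pattern

theorem portA_eq_any (path : String) (wl : List String) :
    is_whitelisted_path_py path wl = wl.any (pvMatch path) := by
  induction wl with
  | nil => rfl
  | cons p rest ih =>
    simp only [is_whitelisted_path_py, List.any_cons]
    by_cases h1 : PySem.Str.endswith p "*" = true
    · have hm : pvMatch path p
          = PySem.Str.startswith path (PySem.Str.slice p none (some (-1))) := by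
        unfold pvMatch; rw [if_pos h1]
      rw [if_pos h1, hm]
      by_cases h2 : PySem.Str.startswith path (PySem.Str.slice p none (some (-1))) = true
      · rw [if_pos h2, h2]; simp
      · rw [if_neg h2, ih]
        rw [Bool.not_eq_true] at h2
        rw [h2, Bool.false_or]
    · have hm : pvMatch path p = (path == p) := by
        unfold pvMatch; rw [if_neg h1]
      rw [if_neg h1, hm]
      by_cases h2 : (path == p) = true
      · rw [if_pos h2, h2]; simp
      · rw [if_neg h2, ih]
        rw [Bool.not_eq_true] at h2
        rw [h2, Bool.false_or]

-- a pattern matches the path iff it is the path itself or path[:k] + '*' for some k ≤ len(path)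
theorem match_iff (path pattern : String) :
    pvMatch path pattern = true ↔
      (pattern = path ∨
        ∃ k : Nat, k ≤ path.toList.length ∧ pattern.toList = path.toList.take k ++ ['*']) := by
  unfold pvMatch
  by_cases h : PySem.Str.endswith pattern "*" = true
  · rw [if_pos h]
    rw [PySem.Str.endswith_eq] at h
    rw [PySem.Chars.endswith_iff] at h
    obtain ⟨pre, hpre⟩ := h
    have hchars : pattern.toList = pre ++ ['*'] := by
      simpa using hpre.symm
    rw [PySem.Str.startswith_eq, PySem.Chars.startswith_iff, PySem.Str.slice_to_neg_one,
        hchars, List.dropLast_concat]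
    constructor
    · intro hp
      right
      refine ⟨pre.length, hp.length_le, ?_⟩
      rw [← List.prefix_iff_eq_take.mp hp]
    · rintro (rfl | ⟨k, hk, hpat⟩)
      · -- pattern = path: pre is a prefix of pre ++ ['*'] = path.toList
        rw [hchars]; exact ⟨['*'], rfl⟩
      · have : pre = path.toList.take k := (List.append_inj' hpat rfl).1
        rw [this]; exact List.take_prefix k _
  · rw [if_neg h]
    constructor
    · intro hp; left; exact (beq_iff_eq.mp hp).symm
    · rintro (rfl | ⟨k, hk, hpat⟩)
      · exact beq_self_eq_true _
      · exfalso; apply h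
        rw [PySem.Str.endswith_eq, PySem.Chars.endswith_iff]
        exact ⟨path.toList.take k, by simpa using hpat.symm⟩

theorem contains_ofList (wl : List String) (x : String) :
    PySem.Set.contains (PySem.Set.ofList wl) x = true ↔ x ∈ wl := by
  rw [show (PySem.Set.contains (PySem.Set.ofList wl) x = true) ↔ x ∈ PySem.Set.ofList wl from by
    simp [PySem.Set.contains]]
  exact PySem.Set.mem_ofList wl x

-- ===== VERDICT (by name: the statement is the Claim_ definition above) =====
theorem is_whitelisted_path_py_spec : Claim_equal_is_whitelisted_path_py := by
  intro path wl _
  unfold Spec_is_whitelisted_path_py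
  rw [portA_eq_any]
  show _ = (if PySem.Set.contains (PySem.Set.ofList wl) path then true
    else (PySem.List.pyRange 0 (PySem.Str.len path + 1) 1).any
      (fun k => PySem.Set.contains (PySem.Set.ofList wl) (pvCand path k)))
  rw [Bool.eq_iff_iff]
  rw [show (if PySem.Set.contains (PySem.Set.ofList wl) path then true
    else (PySem.List.pyRange 0 (PySem.Str.len path + 1) 1).any
      (fun k => PySem.Set.contains (PySem.Set.ofList wl) (pvCand path k)))
    = (PySem.Set.contains (PySem.Set.ofList wl) path
        || (PySem.List.pyRange 0 (PySem.Str.len path + 1) 1).any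
            (fun k => PySem.Set.contains (PySem.Set.ofList wl) (pvCand path k))) from by
      cases PySem.Set.contains (PySem.Set.ofList wl) path <;> simp]
  rw [Bool.or_eq_true, List.any_eq_true, List.any_eq_true]
  constructor
  · rintro ⟨pattern, hmem, hm⟩
    rcases (match_iff path pattern).mp hm with rfl | ⟨k, hk, hpat⟩
    · left; exact (contains_ofList wl pattern).mpr hmem
    · right
      refine ⟨(k : Int), ?_, ?_⟩
      · rw [PySem.List.mem_pyRange_one]
        constructor
        · exact Int.natCast_nonneg k
        · rw [PySem.Str.len_eq]; omega
      · rw [contains_ofList]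
        have hcand : pvCand path (k : Int) = pattern := by
          apply String.toList_inj.mp
          unfold pvCand
          rw [String.toList_ofList, PySem.Chars.slice_eq_listSlice,
              PySem.List.slice_to _ (Int.natCast_nonneg k), Int.toNat_natCast, hpat]
        rw [hcand]; exact hmem
  · rintro (hc | ⟨k, hk, hc⟩)
    · refine ⟨path, (contains_ofList wl path).mp hc, ?_⟩
      rw [match_iff]; left; rfl
    · rw [PySem.List.mem_pyRange_one, PySem.Str.len_eq] at hk
      rw [contains_ofList] at hc
      refine ⟨pvCand path k, hc, ?_⟩
      rw [match_iff]; right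
      refine ⟨k.toNat, by omega, ?_⟩
      unfold pvCand
      rw [String.toList_ofList, PySem.Chars.slice_eq_listSlice,
          PySem.List.slice_to _ hk.1]
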